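-- pv_equiv track=rewrite | github.com/Pranav9347/DataStructures_and_Algorithms | Practice_problems/Quantrium/word_dict.py | ArrayChallenge
-- ===== SOURCE A (Python) =====
-- def ArrayChallenge(strArr):
--     word = strArr[0]
--     words = strArr[1].split(",")
--     for i in range(1,len(word)):
--         if word[:i] in words:
--             if word[i:] in words:
--                 return word[:i] + "," + word[i:]
--     return "not possible"
-- ===== SOURCE B (Python) =====
-- def ArrayChallenge(strArr):
--     word = strArr[0]
--     words = strArr[1].split(",")
--     n = len(word)
--     wset = set(words)
--     cands = [len(w) for w in words
--              if 1 <= len(w) < n and word.startswith(w) and word[len(w):] in wset]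
--     if not cands:
--         return "not possible"
--     i = min(cands)
--     return word[:i] + "," + word[i:]
-- ===== Notes on version B (the rewrite author's own statement) =====
-- stated objective: alternative
-- what changed: B iterates over the dictionary words (kept in a set for the suffix lookup), collecting each word length that yields a valid split, and returns the split at the minimum such length, instead of A's scan over split positions with linear list-membership tests at each position.
import Mathlib
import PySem

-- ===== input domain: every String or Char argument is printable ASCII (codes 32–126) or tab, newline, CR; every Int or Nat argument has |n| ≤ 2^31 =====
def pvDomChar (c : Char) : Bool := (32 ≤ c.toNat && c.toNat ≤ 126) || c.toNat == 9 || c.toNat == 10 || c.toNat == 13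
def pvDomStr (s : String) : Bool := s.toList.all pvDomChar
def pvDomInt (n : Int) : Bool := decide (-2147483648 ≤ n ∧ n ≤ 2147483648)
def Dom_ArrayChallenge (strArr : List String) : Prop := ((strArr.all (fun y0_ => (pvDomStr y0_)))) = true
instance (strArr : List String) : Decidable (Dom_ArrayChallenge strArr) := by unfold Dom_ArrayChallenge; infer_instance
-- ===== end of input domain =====

-- B scans the dictionary words once (with a set for suffix lookups) instead of scanning split
-- positions with linear membership tests; same return value, an alternative decomposition.
-- ===== PORT A =====
-- the loop 'for i in range(1, len(word)): if word[:i] in words: if word[i:] in words: return …'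
def goA (w : List Char) (ws : List (List Char)) : List Int → Option (List Char)
  | [] => none
  | i :: rest =>
    if PySem.List.slice w none (some i) ∈ ws then
      if PySem.List.slice w (some i) none ∈ ws then
        some (PySem.List.slice w none (some i) ++ [','] ++ PySem.List.slice w (some i) none)
      else goA w ws rest
    else goA w ws rest

def ArrayChallenge (strArr : List String) : String :=
  let word := (PySem.List.pyGetD strArr 0 "").toList
  let words := PySem.Chars.splitOn (PySem.List.pyGetD strArr 1 "").toList [',']
  match goA word words (PySem.List.pyRange 1 (word.length : Int)) with
  | some r => String.ofList r
  | none => "not possible"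

-- ===== PORT B =====
def ArrayChallenge_alt (strArr : List String) : String :=
  let word := (PySem.List.pyGetD strArr 0 "").toList
  let words := PySem.Chars.splitOn (PySem.List.pyGetD strArr 1 "").toList [',']
  let n : Int := word.length
  let wset : PySem.Set (List Char) := PySem.Set.ofList words
  let cands : List Int := words.filterMap (fun w =>
    if 1 ≤ (w.length : Int) ∧ (w.length : Int) < n ∧ PySem.Chars.startswith word w = true ∧
       PySem.Set.contains wset (PySem.List.slice word (some (w.length : Int)) none) = true then
      some (w.length : Int)
    else none)
  match PySem.List.min? cands (fun x => x) with
  | some i => String.ofList (PySem.List.slice word none (some i) ++ [','] ++ PySem.List.slice word (some i) none)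
  | none => "not possible"

-- ===== PRECONDITION & SPEC =====
-- A raises IndexError on lists with fewer than two elements; exactly those are excluded.
def Pre_ArrayChallenge (strArr : List String) : Prop := 2 ≤ strArr.length
instance (strArr : List String) : Decidable (Pre_ArrayChallenge strArr) := by unfold Pre_ArrayChallenge; infer_instance
def pvWitness_ArrayChallenge : List String := ["abcd", "ab,cd"]

def Spec_ArrayChallenge (strArr : List String) (out : String) : Prop := out = ArrayChallenge_alt strArr
instance (strArr : List String) (out : String) : Decidable (Spec_ArrayChallenge strArr out) := by unfold Spec_ArrayChallenge; infer_instance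

-- ===== CLAIM (what is proved, stated in full; the proofs are below) =====
def Claim_equal_ArrayChallenge : Prop := ∀ (strArr : List String), Dom_ArrayChallenge strArr → Pre_ArrayChallenge strArr → Spec_ArrayChallenge strArr (ArrayChallenge strArr)

-- ===== LEMMAS AND PROOFS =====

-- A's loop returns the first hit of the range = head of the filtered range.
theorem goA_eq_head (w : List Char) (ws : List (List Char)) (l : List Int) :
    goA w ws l = ((l.filter (fun i => decide (PySem.List.slice w none (some i) ∈ ws ∧
        PySem.List.slice w (some i) none ∈ ws))).head?).map
      (fun i => PySem.List.slice w none (some i) ++ [','] ++ PySem.List.slice w (some i) none) := by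
  induction l with
  | nil => rfl
  | cons i rest ih =>
    simp only [goA, List.filter_cons]
    by_cases h1 : PySem.List.slice w none (some i) ∈ ws <;>
      by_cases h2 : PySem.List.slice w (some i) none ∈ ws <;>
      simp [h1, h2, ih]

-- head of a <-pairwise list is its min?
theorem head?_eq_min?_of_pairwise (l : List Int) (hl : l.Pairwise (· < ·)) :
    l.head? = PySem.List.min? l (fun x => x) := by
  cases l with
  | nil => rfl
  | cons m t =>
    cases hmin : PySem.List.min? (m :: t) (fun x => x) with
    | none => simp [PySem.List.min?_eq_none_iff] at hmin
    | some μ =>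
      have hmem := PySem.List.min?_mem hmin
      have hle : μ ≤ m := PySem.List.min?_isMin hmin m (List.mem_cons_self)
      rcases List.mem_cons.mp hmem with rfl | hmem
      · rfl
      · have := (List.pairwise_cons.mp hl).1 μ hmem
        omega

-- min? with the identity key depends only on membership
theorem min?_id_congr_mem (xs ys : List Int) (h : ∀ a, a ∈ xs ↔ a ∈ ys) :
    PySem.List.min? xs (fun x => x) = PySem.List.min? ys (fun x => x) := by
  cases hx : PySem.List.min? xs (fun x => x) with
  | none =>
    rw [PySem.List.min?_eq_none_iff] at hx
    cases hy : PySem.List.min? ys (fun x => x) with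
    | none => rfl
    | some m =>
      have := (h m).mpr (PySem.List.min?_mem hy)
      simp [hx] at this
  | some m =>
    cases hy : PySem.List.min? ys (fun x => x) with
    | none =>
      rw [PySem.List.min?_eq_none_iff] at hy
      have := (h m).mp (PySem.List.min?_mem hx)
      simp [hy] at this
    | some m' =>
      have h1 : m ≤ m' := PySem.List.min?_isMin hx m' ((h m').mpr (PySem.List.min?_mem hy))
      have h2 : m' ≤ m := PySem.List.min?_isMin hy m ((h m).mp (PySem.List.min?_mem hx))
      have : m = m' := le_antisymm h1 h2
      rw [this]

-- membership in B's candidate list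
theorem mem_cands_iff (word : List Char) (ws : List (List Char)) (a : Int) :
    a ∈ ws.filterMap (fun w =>
      if 1 ≤ (w.length : Int) ∧ (w.length : Int) < (word.length : Int) ∧
         PySem.Chars.startswith word w = true ∧
         PySem.Set.contains (PySem.Set.ofList ws) (PySem.List.slice word (some (w.length : Int)) none) = true then
        some (w.length : Int)
      else none) ↔
    (1 ≤ a ∧ a < (word.length : Int) ∧ PySem.List.slice word none (some a) ∈ ws ∧
      PySem.List.slice word (some a) none ∈ ws) := by
  simp only [List.mem_filterMap]
  constructor
  · rintro ⟨w, hw, hcond⟩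
    split_ifs at hcond with hc
    · obtain ⟨h1, h2, h3, h4⟩ := hc
      cases hcond
      have hpre : w <+: word := (PySem.Chars.startswith_iff word w).mp h3
      have htake : word.take w.length = w := (List.prefix_iff_eq_take.mp hpre).symm
      refine ⟨h1, h2, ?_, ?_⟩
      · rw [PySem.List.slice_to_natCast, htake]; exact hw
      · have := h4
        simpa [PySem.Set.contains, PySem.Set.mem_ofList] using this
  · rintro ⟨h1, h2, h3, h4⟩
    have ha : a.toNat ≤ word.length := by omega
    have hlen : ((PySem.List.slice word none (some a)).length : Int) = a := by
      rw [PySem.List.slice_to word (by omega : (0:Int) ≤ a), List.length_take]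
      omega
    refine ⟨PySem.List.slice word none (some a), h3, ?_⟩
    rw [hlen]
    have hpre : PySem.List.slice word none (some a) <+: word := by
      rw [PySem.List.slice_to word (by omega : (0:Int) ≤ a)]; exact List.take_prefix _ _
    have hsw : PySem.Chars.startswith word (PySem.List.slice word none (some a)) = true :=
      (PySem.Chars.startswith_iff _ _).mpr hpre
    simp only [PySem.Set.contains]
    simp [h1, h2, hsw, h4]

theorem match_map_out (o : Option Int) (f : Int → List Char) :
    (match o.map f with | some r => String.ofList r | none => "not possible") =
    (match o with | some i => String.ofList (f i) | none => "not possible") := by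
  cases o <;> rfl

-- ===== VERDICT (by name: the statement is the Claim_ definition above) =====
theorem ArrayChallenge_spec : Claim_equal_ArrayChallenge := by
  intro strArr _hDom _hPre
  unfold Spec_ArrayChallenge ArrayChallenge ArrayChallenge_alt
  set word := (PySem.List.pyGetD strArr 0 "").toList with hword
  set ws := PySem.Chars.splitOn (PySem.List.pyGetD strArr 1 "").toList [','] with hws
  simp only [goA_eq_head]
  have hpair : ((PySem.List.pyRange 1 (word.length : Int)).filter
      (fun i => decide (PySem.List.slice word none (some i) ∈ ws ∧
        PySem.List.slice word (some i) none ∈ ws))).Pairwise (· < ·) :=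
    (PySem.List.pairwise_lt_pyRange_one 1 (word.length : Int)).filter _
  rw [head?_eq_min?_of_pairwise _ hpair]
  rw [min?_id_congr_mem _ _ (fun a => by
    rw [mem_cands_iff word ws a]
    simp only [List.mem_filter, PySem.List.mem_pyRange_one, decide_eq_true_eq]
    tauto)]
  exact match_map_out _ _
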